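-- pv_equiv track=rewrite | github.com/ElPsyKurisu/piec | src/piec/drivers/mccdig.py | get_sparse_array
-- ===== SOURCE A (Python) =====
-- def get_sparse_array(arr):
--     """
--     Taken with help from Deepseek V3 Deepthink
--     Used to re sparse an array from a dense array
--     """
--
--     # Step 1: Create groups of consecutive elements
--     groups = []
--     current_val = arr[0]
--     current_count = 1
--     for val in arr[1:]:
--         if val == current_val:
--             current_count += 1
--         else:
--             groups.append((current_val, current_count))
--             current_val = val
--             current_count = 1
--     groups.append((current_val, current_count))
--
--     # Step 2: Check if all group counts are even
--     all_even = all(count % 2 == 0 for (_, count) in groups)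
--     if not all_even:
--         return arr.copy()
--
--     # Step 3: Construct the result by taking half from each group
--     result = []
--     for val, count in groups:
--         result.extend([val] * (count // 2))
--
--     return result
-- ===== SOURCE B (Python) =====
-- def get_sparse_array(arr):
--     # Pairwise view: all run lengths are even iff len(arr) is even and
--     # arr[i] == arr[i+1] for every even i; then the halved array is arr[::2].
--     n = len(arr)
--     ok = n % 2 == 0 and all(arr[i] == arr[i + 1] for i in range(0, n, 2))
--     return arr[::2] if ok else arr.copy()
-- ===== Notes on version B (the rewrite author's own statement) =====
-- stated objective: simpler
-- what changed: B never builds the run-length groups list: it tests len(arr) even plus arr[i]==arr[i+1] at every even i (equivalent to all run counts even) and returns arr[::2] in that case, arr.copy() otherwise.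
import Mathlib
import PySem

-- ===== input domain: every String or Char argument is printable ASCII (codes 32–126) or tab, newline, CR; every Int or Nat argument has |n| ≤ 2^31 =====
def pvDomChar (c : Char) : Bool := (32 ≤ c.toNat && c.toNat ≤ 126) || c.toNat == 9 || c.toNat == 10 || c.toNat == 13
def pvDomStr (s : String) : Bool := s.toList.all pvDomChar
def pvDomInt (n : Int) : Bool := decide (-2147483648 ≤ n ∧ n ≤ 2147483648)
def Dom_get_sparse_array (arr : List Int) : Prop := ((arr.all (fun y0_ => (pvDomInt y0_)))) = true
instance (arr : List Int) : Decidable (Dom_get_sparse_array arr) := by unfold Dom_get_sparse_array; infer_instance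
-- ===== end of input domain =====

-- B replaces A's run-length-grouping pass by a direct pairwise test (len even and
-- arr[i]==arr[i+1] at every even i) returning arr[::2] when it holds; objective: simpler.


-- ===== PORT A =====
-- literal transliteration of A: fold over arr[1:] building (groups, current_val,
-- current_count); run counts are kept as Nat (the Python counts are positive, so Nat's
-- % and / here coincide with Python's % and //).
def get_sparse_array (arr : List Int) : List Int :=
  match arr with
  | [] => []  -- Python raises IndexError at arr[0]; excluded by Pre_
  | a :: rest =>
    let st := rest.foldl
      (fun (st : List (Int × Nat) × Int × Nat) val =>
        if val == st.2.1 then (st.1, st.2.1, st.2.2 + 1)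
        else (st.1 ++ [(st.2.1, st.2.2)], val, 1))
      ([], a, 1)
    let groups := st.1 ++ [(st.2.1, st.2.2)]
    let allEven := groups.all (fun p => p.2 % 2 == 0)
    if !allEven then arr
    else groups.foldl (fun res p => res ++ List.replicate (p.2 / 2) p.1) []

-- ===== PORT B =====
-- pvPairEq: 'all(arr[i] == arr[i+1] for i in range(0, n, 2))' — the generator reads
-- the pairs (arr[0],arr[1]), (arr[2],arr[3]), … in order; exact on even-length input,
-- and on odd length the '[_] => false' case is masked by the length test, as Python's
-- short-circuit 'and' masks the would-be IndexError.
def pvPairEq : List Int → Bool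
  | [] => true
  | [_] => false
  | x :: y :: t => x == y && pvPairEq t

-- pvEvens: arr[::2] (PySem has no step-2 slice lemma; this takes every second element
-- starting at index 0, exactly Python's arr[::2]).
def pvEvens : List Int → List Int
  | [] => []
  | [x] => [x]
  | x :: _ :: t => x :: pvEvens t

def get_sparse_array_alt (arr : List Int) : List Int :=
  let ok := decide (arr.length % 2 = 0) && pvPairEq arr
  if ok then pvEvens arr else arr

-- ===== PRECONDITION & SPEC =====
-- Pre_ excludes only the empty list, on which Python A raises IndexError (arr[0]).
def Pre_get_sparse_array (arr : List Int) : Prop := arr ≠ []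
instance (arr : List Int) : Decidable (Pre_get_sparse_array arr) := by unfold Pre_get_sparse_array; infer_instance
def pvWitness_get_sparse_array : List Int := [1, 1, 2, 2]

def Spec_get_sparse_array (arr : List Int) (out : List Int) : Prop := out = get_sparse_array_alt arr
instance (arr : List Int) (out : List Int) : Decidable (Spec_get_sparse_array arr out) := by unfold Spec_get_sparse_array; infer_instance

-- ===== CLAIM (what is proved, stated in full; the proofs are below) =====
def Claim_equal_get_sparse_array : Prop := ∀ (arr : List Int), Dom_get_sparse_array arr → Pre_get_sparse_array arr → Spec_get_sparse_array arr (get_sparse_array arr)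

-- ===== LEMMAS AND PROOFS =====

-- run-length groups of (replicate c v ++ t) whose open run is (v, c)
def groupsOf (v : Int) (c : Nat) : List Int → List (Int × Nat)
  | [] => [(v, c)]
  | x :: t => if x == v then groupsOf v (c + 1) t else (v, c) :: groupsOf x 1 t

def halvesOf (g : List (Int × Nat)) : List Int := g.flatMap (fun p => List.replicate (p.2 / 2) p.1)

lemma repl_cons (c : Nat) (v : Int) (t : List Int) :
    List.replicate c v ++ v :: t = List.replicate (c + 1) v ++ t := by
  rw [List.replicate_succ', List.append_assoc]; rfl

lemma pairEq_replicate (v : Int) : ∀ c, pvPairEq (List.replicate c v) = (c % 2 == 0)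
  | 0 => rfl
  | 1 => rfl
  | (c + 2) => by
    rw [show List.replicate (c + 2) v = v :: v :: List.replicate c v from rfl]
    simp [pvPairEq, pairEq_replicate v c, Nat.add_mod_right]

lemma pairEq_replicate_append (v x : Int) (t : List Int) (hx : x ≠ v) :
    ∀ c, pvPairEq (List.replicate c v ++ x :: t) = ((c % 2 == 0) && pvPairEq (x :: t))
  | 0 => by simp
  | 1 => by
    simp [pvPairEq, List.replicate]
    intro h; exact absurd h.symm hx
  | (c + 2) => by
    rw [show List.replicate (c + 2) v = v :: v :: List.replicate c v from rfl]
    simp [pvPairEq, pairEq_replicate_append v x t hx c, Nat.add_mod_right]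

lemma evens_replicate (v : Int) : ∀ c, pvEvens (List.replicate c v) = List.replicate ((c + 1) / 2) v
  | 0 => rfl
  | 1 => rfl
  | (c + 2) => by
    rw [show List.replicate (c + 2) v = v :: v :: List.replicate c v from rfl]
    rw [pvEvens, evens_replicate v c]
    rw [show (c + 2 + 1) / 2 = (c + 1) / 2 + 1 by omega, List.replicate_succ]

lemma evens_replicate_append (v : Int) (m : List Int) :
    ∀ c, c % 2 = 0 → pvEvens (List.replicate c v ++ m) = List.replicate (c / 2) v ++ pvEvens m
  | 0, _ => by simp
  | 1, h => by omega
  | (c + 2), h => by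
    rw [show List.replicate (c + 2) v = v :: v :: List.replicate c v from rfl]
    have hc : c % 2 = 0 := by omega
    rw [List.cons_append, List.cons_append, pvEvens, evens_replicate_append v m c hc]
    rw [show (c + 2) / 2 = c / 2 + 1 by omega, List.replicate_succ]
    rfl

lemma pairEq_even_length : ∀ (l : List Int), pvPairEq l = true → l.length % 2 = 0
  | [], _ => rfl
  | [_], h => by simp [pvPairEq] at h
  | _ :: _ :: t, h => by
    have := pairEq_even_length t (by simp [pvPairEq] at h; exact h.2)
    simp [List.length]; omega

lemma allEven_groupsOf : ∀ (t : List Int) (v : Int) (c : Nat),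
    ((groupsOf v c t).all (fun p => p.2 % 2 == 0)) = pvPairEq (List.replicate c v ++ t)
  | [], v, c => by simp [groupsOf, pairEq_replicate]
  | x :: t, v, c => by
    rw [groupsOf]
    by_cases hx : x = v
    · subst hx
      simp only [BEq.rfl, if_true, repl_cons]
      exact allEven_groupsOf t x (c + 1)
    · rw [if_neg (by simp [hx]), pairEq_replicate_append v x t hx c]
      have := allEven_groupsOf t x 1
      simp only [List.replicate, List.singleton_append] at this
      simp [this]

lemma halves_groupsOf : ∀ (t : List Int) (v : Int) (c : Nat),
    pvPairEq (List.replicate c v ++ t) = true →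
    halvesOf (groupsOf v c t) = pvEvens (List.replicate c v ++ t)
  | [], v, c, h => by
    rw [List.append_nil] at h
    rw [pairEq_replicate] at h
    have hc : c % 2 = 0 := by simpa using h
    simp [groupsOf, halvesOf, evens_replicate, show (c + 1) / 2 = c / 2 by omega]
  | x :: t, v, c, h => by
    rw [groupsOf]
    by_cases hx : x = v
    · subst hx
      rw [repl_cons] at h ⊢
      rw [if_pos (by simp)]
      exact halves_groupsOf t x (c + 1) h
    · rw [pairEq_replicate_append v x t hx c] at h
      have hc : c % 2 = 0 := by
        rcases Bool.and_eq_true_iff.mp h with ⟨h1, _⟩; simpa using h1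
      have hrest : pvPairEq (x :: t) = true := (Bool.and_eq_true_iff.mp h).2
      rw [if_neg (by simp [hx])]
      rw [evens_replicate_append v (x :: t) c hc]
      have := halves_groupsOf t x 1 (by simpa using hrest)
      simp only [List.replicate, List.singleton_append] at this
      simp [halvesOf] at this ⊢
      exact this

-- the port's fold builds exactly groupsOf (final open run appended)
lemma fold_groups : ∀ (rest : List Int) (g : List (Int × Nat)) (v : Int) (c : Nat),
    (let st := rest.foldl
        (fun (st : List (Int × Nat) × Int × Nat) val =>
          if val == st.2.1 then (st.1, st.2.1, st.2.2 + 1)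
          else (st.1 ++ [(st.2.1, st.2.2)], val, 1))
        (g, v, c);
      st.1 ++ [(st.2.1, st.2.2)]) = g ++ groupsOf v c rest
  | [], g, v, c => by simp [groupsOf]
  | x :: rest, g, v, c => by
    simp only [List.foldl_cons]
    by_cases hx : x = v
    · subst hx
      rw [groupsOf, if_pos (by simp)]
      simpa using fold_groups rest g x (c + 1)
    · rw [groupsOf, if_neg (by simp [hx])]
      have h2 : (x == v) = false := by simp [hx]
      simp only [h2, Bool.false_eq_true, if_false]
      rw [fold_groups rest (g ++ [(v, c)]) x 1, List.append_assoc]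
      rfl

-- ===== VERDICT (by name: the statement is the Claim_ definition above) =====
theorem get_sparse_array_spec : Claim_equal_get_sparse_array := by
  intro arr _ hpre
  unfold Spec_get_sparse_array
  match arr with
  | [] => exact absurd rfl hpre
  | a :: rest =>
    show get_sparse_array (a :: rest) = get_sparse_array_alt (a :: rest)
    simp only [get_sparse_array, get_sparse_array_alt]
    have hg := fold_groups rest [] a 1
    simp only [List.nil_append] at hg
    rw [hg]
    have hE := allEven_groupsOf rest a 1
    simp only [List.replicate, List.singleton_append] at hE
    rw [hE]
    have hfold := PySem.List.foldl_append_eq_flatMap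
      (l := groupsOf a 1 rest) (g := fun p : Int × Nat => List.replicate (p.2 / 2) p.1) (acc := [])
    by_cases hp : pvPairEq (a :: rest) = true
    · have hlen : (a :: rest).length % 2 = 0 := pairEq_even_length _ hp
      rw [hp]
      simp only [Bool.not_true, Bool.false_eq_true, if_false]
      rw [hfold, List.nil_append]
      have := halves_groupsOf rest a 1 (by simpa using hp)
      simp only [List.replicate, List.singleton_append] at this
      rw [halvesOf] at this
      rw [this]
      rw [if_pos (by simp; simpa using hlen)]
    · have hp' : pvPairEq (a :: rest) = false := by
        cases hb : pvPairEq (a :: rest) <;> simp_all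
      rw [hp']
      simp
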